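-- pv_equiv track=rewrite | github.com/feirik/Writeups | guessing_game_4/solve.py | make_list_thirteen
-- ===== SOURCE A (Python) =====
-- def make_list_thirteen(false_count_list):
--     zero_false_list = []
--     one_false_list = []
--     two_false_list = []
--     three_false_list = []
--
--     iter = 0
--     for i in false_count_list:
--         if i == 0:
--             zero_false_list.append(iter)
--         if i == 1:
--             one_false_list.append(iter)
--         if i == 2:
--             two_false_list.append(iter)
--         if i == 3:
--             three_false_list.append(iter)
--         iter += 1
--
--     remove_zero = zero_false_list[:0]
--     remove_one = one_false_list[:8]
--     remove_two = two_false_list[:30]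
--     remove_three = three_false_list[:110]
--
--     test_list = remove_zero + remove_one + remove_two + remove_three
--
--     return test_list
-- ===== SOURCE B (Python) =====
-- def make_list_thirteen(false_count_list):
--     limits = {1: 8, 2: 30, 3: 110}
--     result = []
--     for value, limit in limits.items():
--         result.extend([i for i, x in enumerate(false_count_list) if x == value][:limit])
--     return result
-- ===== Notes on version B (the rewrite author's own statement) =====
-- stated objective: simpler
-- what changed: Replaces A's single pass with four parallel append-buckets and an always-empty zero bucket by a loop over a {value: limit} table that per value collects matching indices via enumerate and takes the first limit of them.
import Mathlib
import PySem

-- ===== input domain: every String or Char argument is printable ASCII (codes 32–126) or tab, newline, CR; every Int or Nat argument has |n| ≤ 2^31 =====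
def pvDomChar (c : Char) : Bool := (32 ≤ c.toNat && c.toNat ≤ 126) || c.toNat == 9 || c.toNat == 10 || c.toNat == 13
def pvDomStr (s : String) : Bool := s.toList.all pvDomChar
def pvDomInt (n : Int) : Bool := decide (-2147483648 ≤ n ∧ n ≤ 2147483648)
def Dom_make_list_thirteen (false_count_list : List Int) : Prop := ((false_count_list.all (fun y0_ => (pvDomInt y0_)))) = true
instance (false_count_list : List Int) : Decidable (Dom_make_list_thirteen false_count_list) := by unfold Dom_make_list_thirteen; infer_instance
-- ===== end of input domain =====

-- B replaces A's one pass with four parallel if-buckets by a loop over a {value: limit}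
-- table doing one enumerate-scan per value; objective: simpler (same O(n) cost).

-- ===== PORT A =====
-- the for-loop: state (zero, one, two, three, iter); appends stay appends ( ++ [iter] )
def make_list_thirteen (false_count_list : List Int) : List Int :=
  let st := false_count_list.foldl
    (fun (s : List Int × List Int × List Int × List Int × Int) i =>
      let z := if i == 0 then s.1 ++ [s.2.2.2.2] else s.1
      let o := if i == 1 then s.2.1 ++ [s.2.2.2.2] else s.2.1
      let t := if i == 2 then s.2.2.1 ++ [s.2.2.2.2] else s.2.2.1
      let th := if i == 3 then s.2.2.2.1 ++ [s.2.2.2.2] else s.2.2.2.1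
      (z, o, t, th, s.2.2.2.2 + 1))
    ([], [], [], [], 0)
  -- xs[:n] with literal n ≥ 0 is exactly List.take n
  st.1.take 0 ++ st.2.1.take 8 ++ st.2.2.1.take 30 ++ st.2.2.2.1.take 110

-- ===== PORT B =====
-- the dict literal's items() in insertion order
def make_list_thirteen_alt (false_count_list : List Int) : List Int :=
  [((1 : Int), 8), (2, 30), (3, 110)].foldl
    (fun result vl =>
      result ++
        ((((PySem.List.enumerate false_count_list 0).filter (fun p => p.2 == vl.1)).map
          (·.1)).take vl.2))
    []

-- ===== PRECONDITION & SPEC =====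
def Spec_make_list_thirteen (false_count_list : List Int) (out : List Int) : Prop := out = make_list_thirteen_alt false_count_list
instance (false_count_list : List Int) (out : List Int) : Decidable (Spec_make_list_thirteen false_count_list out) := by unfold Spec_make_list_thirteen; infer_instance

-- ===== CLAIM (what is proved, stated in full; the proofs are below) =====
def Claim_equal_make_list_thirteen : Prop := ∀ (false_count_list : List Int), Dom_make_list_thirteen false_count_list → Spec_make_list_thirteen false_count_list (make_list_thirteen false_count_list)

-- ===== LEMMAS AND PROOFS =====

-- indices (starting at k) of the elements equal to v, as B computes them
def pvBucket (xs : List Int) (k v : Int) : List Int :=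
  ((PySem.List.enumerate xs k).filter (fun p => p.2 == v)).map (·.1)

theorem pvBucket_nil (k v : Int) : pvBucket [] k v = [] := rfl

theorem pvBucket_cons (x : Int) (xs : List Int) (k v : Int) :
    pvBucket (x :: xs) k v =
      (if x == v then [k] else []) ++ pvBucket xs (k + 1) v := by
  simp only [pvBucket, PySem.List.enumerate_cons, List.filter_cons]
  by_cases h : x = v <;> simp [h]

-- invariant of A's fold: each bucket is the accumulator followed by the fresh indices
theorem pvFoldA_eq (xs : List Int) (z o t th : List Int) (k : Int) :
    xs.foldl
      (fun (s : List Int × List Int × List Int × List Int × Int) i =>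
        let z := if i == 0 then s.1 ++ [s.2.2.2.2] else s.1
        let o := if i == 1 then s.2.1 ++ [s.2.2.2.2] else s.2.1
        let t := if i == 2 then s.2.2.1 ++ [s.2.2.2.2] else s.2.2.1
        let th := if i == 3 then s.2.2.2.1 ++ [s.2.2.2.2] else s.2.2.2.1
        (z, o, t, th, s.2.2.2.2 + 1))
      (z, o, t, th, k) =
      (z ++ pvBucket xs k 0, o ++ pvBucket xs k 1, t ++ pvBucket xs k 2,
        th ++ pvBucket xs k 3, k + xs.length) := by
  induction xs generalizing z o t th k with
  | nil => simp [pvBucket_nil]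
  | cons x xs ih =>
    simp only [List.foldl_cons, ih, pvBucket_cons, List.length_cons]
    by_cases h0 : x = 0 <;> by_cases h1 : x = 1 <;> by_cases h2 : x = 2 <;>
      by_cases h3 : x = 3 <;> simp [h0, h1, h2, h3] <;> omega

-- ===== VERDICT (by name: the statement is the Claim_ definition above) =====
theorem make_list_thirteen_spec : Claim_equal_make_list_thirteen := by
  intro xs _
  show make_list_thirteen xs = make_list_thirteen_alt xs
  simp only [make_list_thirteen, make_list_thirteen_alt, pvFoldA_eq, List.foldl_cons,
    List.foldl_nil]
  simp [pvBucket]
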